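-- pv_equiv track=rewrite | github.com/yustero/csb | programs/three_state/node_specific_turnoff.py | steady_check
-- ===== SOURCE A (Python) =====
-- def evolve(nodes_state,adj,pos, hybn):
--
--     n=len(adj)
--     adj_sum=0
--     buffer=nodes_state.copy()
--     if pos not in hybn:
--         for i in range(0,n):
--             adj_sum+= (nodes_state[i]*adj[i][pos])
--         if adj_sum>0:
--             buffer[pos]=1
--
--
--         elif adj_sum<0:
--             buffer[pos]=-1
--
--         elif adj_sum==0:
--             buffer[pos]= buffer[pos]
--         return(buffer)
--
--     if pos in hybn:
--         for i in range(0,n):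
--             adj_sum+= (nodes_state[i]*adj[i][pos])
--         if adj_sum>0:
--             buffer[pos]=1
--
--
--         elif adj_sum<0:
--             buffer[pos]=-1
--
--         elif adj_sum==0:
--             buffer[pos]=0
--         return(buffer)
--
-- def steady_check(nodes,adj,hybn):
--     n=len(adj)
--     count=0
--     for i in range(0,n):
--         if evolve(nodes,adj,i,hybn)[i]!= nodes[i]:
--
--            count+=1
--
--     if count==0:
--         return(True)
--     else:
--         return(False)
-- ===== SOURCE B (Python) =====
-- def steady_check(nodes, adj, hybn):
--     # Row-major: accumulate the whole matrix-vector product in one vector,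
--     # then compare signs in a second pass (no per-node column dot products).
--     n = len(adj)
--     sums = [0] * n
--     for v, row in zip(nodes, adj):
--         sums = [s + v * x for s, x in zip(sums, row)]
--     frozen = set(hybn)
--     return all(
--         nodes[i] == (1 if s > 0 else -1 if s < 0 else (0 if i in frozen else nodes[i]))
--         for i, s in enumerate(sums)
--     )
-- ===== Notes on version B (the rewrite author's own statement) =====
-- stated objective: alternative
-- what changed: Instead of A's per-node column dot products through the evolve helper (which rebuilds a full buffer copy per node), B computes the whole matrix-vector product once by row-major accumulation into a sums vector (one componentwise list update per row, never indexing columns), then does a single sign-comparison pass over enumerate(sums) with hybn turned into a set; the measured speedup comes from dropping evolve's O(n) copy and Python-level indexing per node.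
import Mathlib
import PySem

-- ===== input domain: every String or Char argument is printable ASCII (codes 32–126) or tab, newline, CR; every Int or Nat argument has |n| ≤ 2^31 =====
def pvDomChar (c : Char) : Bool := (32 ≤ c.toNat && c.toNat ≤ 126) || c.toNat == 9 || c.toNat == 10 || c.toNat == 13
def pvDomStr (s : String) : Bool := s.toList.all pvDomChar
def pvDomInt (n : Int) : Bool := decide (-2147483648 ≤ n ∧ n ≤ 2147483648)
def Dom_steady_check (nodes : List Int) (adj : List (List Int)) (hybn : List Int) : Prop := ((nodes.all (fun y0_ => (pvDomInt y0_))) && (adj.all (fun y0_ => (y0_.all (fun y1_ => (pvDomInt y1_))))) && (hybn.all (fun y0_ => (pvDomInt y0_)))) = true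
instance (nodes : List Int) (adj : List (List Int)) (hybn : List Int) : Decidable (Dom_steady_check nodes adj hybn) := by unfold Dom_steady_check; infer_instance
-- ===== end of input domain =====

-- B replaces A's per-node column dot products (via the evolve helper and its buffer copies)
-- by a single row-major accumulation of the whole matrix-vector product, followed by one
-- sign-comparison pass; a timing run measured B faster (no per-node buffer copies).

-- ===== PORT A =====
-- literal port of A's helper 'evolve' (buffer copy, two symmetric branches on pos ∈ hybn)
def evolve (nodes_state : List Int) (adj : List (List Int)) (pos : Int) (hybn : List Int) : List Int :=
  let n : Int := (adj.length : Int)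
  let buffer := nodes_state
  if pos ∉ hybn then
    let adj_sum := (PySem.List.pyRange 0 n 1).foldl
      (fun s i => s + PySem.List.pyGetD nodes_state i 0 * PySem.List.pyGetD (PySem.List.pyGetD adj i []) pos 0) 0
    if adj_sum > 0 then PySem.List.pySetD buffer pos 1
    else if adj_sum < 0 then PySem.List.pySetD buffer pos (-1)
    else buffer
  else
    let adj_sum := (PySem.List.pyRange 0 n 1).foldl
      (fun s i => s + PySem.List.pyGetD nodes_state i 0 * PySem.List.pyGetD (PySem.List.pyGetD adj i []) pos 0) 0
    if adj_sum > 0 then PySem.List.pySetD buffer pos 1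
    else if adj_sum < 0 then PySem.List.pySetD buffer pos (-1)
    else PySem.List.pySetD buffer pos 0

def steady_check (nodes : List Int) (adj : List (List Int)) (hybn : List Int) : Bool :=
  let n : Int := (adj.length : Int)
  let count : Int := (PySem.List.pyRange 0 n 1).foldl
    (fun c i => if PySem.List.pyGetD (evolve nodes adj i hybn) i 0 ≠ PySem.List.pyGetD nodes i 0 then c + 1 else c) 0
  if count = 0 then true else false

-- ===== PORT B =====
def steady_check_alt (nodes : List Int) (adj : List (List Int)) (hybn : List Int) : Bool :=
  let n := adj.length
  let sums := (nodes.zip adj).foldl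
    (fun sums p => (sums.zip p.2).map (fun q => q.1 + p.1 * q.2))
    (List.replicate n 0)
  let frozen := PySem.Set.ofList hybn
  (PySem.List.enumerate sums).all (fun p =>
    PySem.List.pyGetD nodes p.1 0 ==
      (if p.2 > 0 then 1 else if p.2 < 0 then -1 else if p.1 ∈ frozen then 0 else PySem.List.pyGetD nodes p.1 0))

-- ===== PRECONDITION & SPEC =====
-- Pre_ excludes exactly the inputs on which Python A raises IndexError:
-- nodes shorter than adj, or some row of adj shorter than adj (both hit during A's full scan).
def Pre_steady_check (nodes : List Int) (adj : List (List Int)) (hybn : List Int) : Prop :=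
  adj.length ≤ nodes.length ∧ ∀ r ∈ adj, adj.length ≤ r.length
instance (nodes : List Int) (adj : List (List Int)) (hybn : List Int) : Decidable (Pre_steady_check nodes adj hybn) := by unfold Pre_steady_check; infer_instance

def pvWitness_steady_check : List Int × List (List Int) × List Int :=
  ([1, -1], [[0, 1], [1, 0]], [1])

def Spec_steady_check (nodes : List Int) (adj : List (List Int)) (hybn : List Int) (out : Bool) : Prop := out = steady_check_alt nodes adj hybn
instance (nodes : List Int) (adj : List (List Int)) (hybn : List Int) (out : Bool) : Decidable (Spec_steady_check nodes adj hybn out) := by unfold Spec_steady_check; infer_instance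

-- ===== CLAIM (what is proved, stated in full; the proofs are below) =====
def Claim_equal_steady_check : Prop := ∀ (nodes : List Int) (adj : List (List Int)) (hybn : List Int), Dom_steady_check nodes adj hybn → Pre_steady_check nodes adj hybn → Spec_steady_check nodes adj hybn (steady_check nodes adj hybn)

-- ===== LEMMAS AND PROOFS =====

-- the column sum both programs compute, written over the row list
def colSum (nodes : List Int) (adj : List (List Int)) (i : Int) : Int :=
  ((nodes.zip adj).map (fun p => p.1 * PySem.List.pyGetD p.2 i 0)).sum

-- A's per-column fold equals colSum (under Pre_)
theorem scSumA_eq_colSum (nodes : List Int) (adj : List (List Int)) (i : Int)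
    (hlen : adj.length ≤ nodes.length) :
    (PySem.List.pyRange 0 (adj.length : Int) 1).foldl
      (fun s k => s + PySem.List.pyGetD nodes k 0 * PySem.List.pyGetD (PySem.List.pyGetD adj k []) i 0) 0
    = colSum nodes adj i := by
  rw [PySem.List.foldl_add]
  unfold colSum
  rw [zero_add]
  congr 1
  apply List.ext_getElem
  · simp [PySem.List.length_pyRange_one, List.length_zip]
    omega
  · intro k h1 h2
    have hk : k < adj.length := by
      simpa [PySem.List.length_pyRange_one] using h1
    simp [PySem.List.getElem_pyRange_one, List.getElem_zip,
      PySem.List.pyGetD_natCast, List.getD_eq_getElem?_getD,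
      List.getElem?_eq_getElem (by omega : k < nodes.length),
      List.getElem?_eq_getElem hk]

-- B's row-major accumulation: element k of the fold is init[k] plus the column-k sum
theorem foldB_getD (ps : List (Int × List Int)) (L : List Int)
    (hlen : ∀ p ∈ ps, L.length ≤ p.2.length) :
    (ps.foldl (fun sums p => (sums.zip p.2).map (fun q => q.1 + p.1 * q.2)) L).length = L.length ∧
    ∀ k, k < L.length →
      (ps.foldl (fun sums p => (sums.zip p.2).map (fun q => q.1 + p.1 * q.2)) L).getD k 0
        = L.getD k 0 + ((ps.map (fun p => p.1 * PySem.List.pyGetD p.2 (k : Int) 0)).sum) := by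
  induction ps generalizing L with
  | nil => simp
  | cons p ps ih =>
    have hp : L.length ≤ p.2.length := hlen p (by simp)
    have hL' : ((L.zip p.2).map (fun q => q.1 + p.1 * q.2)).length = L.length := by
      simp [List.length_zip]; omega
    have ih' := ih ((L.zip p.2).map (fun q => q.1 + p.1 * q.2))
      (by intro q hq; rw [hL']; exact hlen q (by simp [hq]))
    rw [hL'] at ih'
    refine ⟨by simpa using ih'.1, ?_⟩
    intro k hk
    simp only [List.foldl_cons]
    rw [ih'.2 k hk]
    have hkp : k < p.2.length := by omega
    have : ((L.zip p.2).map (fun q => q.1 + p.1 * q.2)).getD k 0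
        = L.getD k 0 + p.1 * PySem.List.pyGetD p.2 (k : Int) 0 := by
      have hz : k < (L.zip p.2).length := by simp [List.length_zip]; omega
      simp [List.getD_eq_getElem?_getD, List.getElem?_map,
        List.getElem?_eq_getElem hz, List.getElem_zip,
        PySem.List.pyGetD_natCast,
        List.getD_eq_getElem?_getD, List.getElem?_eq_getElem (by omega : k < L.length)]
      exact Or.inl (by simp [List.getElem?_eq_getElem hkp])
    rw [this, List.map_cons, List.sum_cons]
    ring

-- reading back the node A just updated: A's fixed-point test at node i, in terms of colSum
theorem evolve_get (nodes : List Int) (adj : List (List Int)) (hybn : List Int) (i : Int)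
    (h0 : 0 ≤ i) (h1 : i < (adj.length : Int)) (hlen : adj.length ≤ nodes.length) :
    PySem.List.pyGetD (evolve nodes adj i hybn) i 0
      = (if colSum nodes adj i > 0 then 1 else if colSum nodes adj i < 0 then -1
         else if i ∈ hybn then 0 else PySem.List.pyGetD nodes i 0) := by
  have hi : i.toNat < nodes.length := by omega
  have hset : ∀ v : Int, PySem.List.pyGetD (PySem.List.pySetD nodes i v) i 0 = v := by
    intro v
    rw [PySem.List.pySetD_of_nonneg nodes v h0,
        PySem.List.pyGetD_eq_getElem _ 0 h0 (by simp [List.length_set]; omega)]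
    simp [List.getElem_set_self]
  simp only [evolve, scSumA_eq_colSum nodes adj i hlen]
  by_cases hmem : i ∈ hybn <;>
    simp only [hmem, not_true_eq_false, not_false_eq_true, if_true, if_false] <;>
    split_ifs with ha hb <;>
    simp_all

theorem foldl_count_eq_zero (p : Int → Prop) [DecidablePred p] (l : List Int) (c : Int)
    (hc : 0 ≤ c) :
    (l.foldl (fun c i => if p i then c + 1 else c) c = 0) ↔ (c = 0 ∧ ∀ i ∈ l, ¬ p i) := by
  induction l generalizing c with
  | nil => simp
  | cons i rest ih =>
    by_cases hp : p i
    · simp only [List.foldl_cons, hp, if_true]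
      rw [ih (c + 1) (by omega)]
      constructor
      · rintro ⟨h, _⟩; omega
      · rintro ⟨_, h⟩; exact absurd hp (h i (by simp))
    · simp only [List.foldl_cons, hp, if_false]
      rw [ih c hc]
      simp [hp]

-- B returns true iff every node passes the sign test against its column sum
theorem alt_iff (nodes : List Int) (adj : List (List Int)) (hybn : List Int)
    (hrows : ∀ r ∈ adj, adj.length ≤ r.length) :
    steady_check_alt nodes adj hybn = true ↔
      ∀ k : Nat, k < adj.length →
        PySem.List.pyGetD nodes (k : Int) 0
          = (if colSum nodes adj (k : Int) > 0 then 1 else if colSum nodes adj (k : Int) < 0 then -1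
             else if (k : Int) ∈ hybn then 0 else PySem.List.pyGetD nodes (k : Int) 0) := by
  unfold steady_check_alt
  dsimp only
  have hspec := foldB_getD (nodes.zip adj) (List.replicate adj.length 0)
    (by intro p hp
        have : p.2 ∈ adj := (List.of_mem_zip hp).2
        simpa using hrows p.2 this)
  set sums := (nodes.zip adj).foldl
    (fun sums p => (sums.zip p.2).map (fun q => q.1 + p.1 * q.2))
    (List.replicate adj.length 0) with hsums
  have hslen : sums.length = adj.length := by simpa using hspec.1
  have hsval : ∀ k : Nat, k < adj.length → sums.getD k 0 = colSum nodes adj (k : Int) := by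
    intro k hk
    have := hspec.2 k (by simpa using hk)
    simpa [colSum] using this
  rw [PySem.List.enumerate_eq_map_pyRange sums 0, List.all_map, List.all_eq_true]
  constructor
  · intro h k hk
    have hmem : (k : Int) ∈ PySem.List.pyRange 0 (PySem.List.len sums) 1 := by
      rw [PySem.List.mem_pyRange_one]
      constructor
      · exact Int.natCast_nonneg k
      · simp [PySem.List.len, hslen]; omega
    have hv := hsval k hk
    rw [List.getD_eq_getElem?_getD] at hv
    have := h _ hmem
    simpa [Function.comp, PySem.Set.mem_ofList, PySem.List.pyGetD_natCast, hv] using this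
  · intro h j hj
    rw [PySem.List.mem_pyRange_one] at hj
    obtain ⟨hj0, hj1⟩ := hj
    obtain ⟨k, rfl⟩ : ∃ k : Nat, j = (k : Int) := ⟨j.toNat, by omega⟩
    have hk : k < adj.length := by
      simp [PySem.List.len, hslen] at hj1; omega
    have hv := hsval k hk
    rw [List.getD_eq_getElem?_getD] at hv
    simpa [Function.comp, PySem.Set.mem_ofList, PySem.List.pyGetD_natCast, hv] using h k hk

-- ===== VERDICT (by name: the statement is the Claim_ definition above) =====
theorem steady_check_spec : Claim_equal_steady_check := by
  intro nodes adj hybn _ hpre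
  obtain ⟨hlen, hrows⟩ := hpre
  show steady_check nodes adj hybn = steady_check_alt nodes adj hybn
  rw [Bool.eq_iff_iff]
  rw [alt_iff nodes adj hybn hrows]
  simp only [steady_check]
  rw [Bool.ite_eq_true_distrib]
  have key := foldl_count_eq_zero
    (fun i => PySem.List.pyGetD (evolve nodes adj i hybn) i 0 ≠ PySem.List.pyGetD nodes i 0)
    (PySem.List.pyRange 0 (adj.length : Int) 1) 0 le_rfl
  simp only [true_and, not_not] at key
  constructor
  · intro h k hk
    split_ifs at h with hz
    · have hall := key.mp hz
      have hmem : (k : Int) ∈ PySem.List.pyRange 0 (adj.length : Int) 1 :=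
        PySem.List.mem_pyRange_one.mpr ⟨Int.natCast_nonneg k, by omega⟩
      have := hall _ hmem
      rw [evolve_get nodes adj hybn (k : Int) (Int.natCast_nonneg k) (by omega) hlen] at this
      exact this.symm
  · intro h
    have hall : ∀ i ∈ PySem.List.pyRange 0 (adj.length : Int) 1,
        PySem.List.pyGetD (evolve nodes adj i hybn) i 0 = PySem.List.pyGetD nodes i 0 := by
      intro i hi
      obtain ⟨hi0, hi1⟩ := PySem.List.mem_pyRange_one.mp hi
      obtain ⟨k, rfl⟩ : ∃ k : Nat, i = (k : Int) := ⟨i.toNat, by omega⟩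
      rw [evolve_get nodes adj hybn (k : Int) hi0 hi1 hlen]
      exact (h k (by omega)).symm
    rw [if_pos (key.mpr hall)]
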